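-- pv_equiv track=rewrite | github.com/yejeeni/YeoBaek-Coding-Test-Study | 우새빛/9주차/[PGS]기능개발_Lv2.py | solution
-- ===== SOURCE A (Python) =====
-- from collections import deque
--
-- def solution(progresses, speeds):
--     answer = []
--
--     # 전체가 100%가 될 때까지 반복
--     # 매 반복마다 진행 퍼센트를 더해가며 맨 앞의 기능이 100%가 되면 배포
--
--     #앞에서부터 출력되어야함 (FIFO) -> 큐
--     progress = deque(progresses)
--     speed = deque(speeds)
--
--     while (progress):
--         for i in range(len(progress)): #진행 상황 더하기기
--             progress[i] += speed[i]
--             if progress[i] > 100: progress[i] = 100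
--
--         count = 0
--         while ((progress) and (progress[0] == 100)): #맨 앞이 100%가 되면 가능한 만큼 배포
--             progress.popleft()
--             speed.popleft()
--             count += 1
--
--         if count > 0:
--             answer.append(count)
--
--     return answer
-- ===== SOURCE B (Python) =====
-- def solution(progresses, speeds):
--     # One pass: days-to-finish per feature via ceiling division, group by running maximum.
--     answer = []
--     cur = 0
--     cnt = 0
--     for p, s in zip(progresses, speeds):
--         d = max(1, -((p - 100) // s))
--         if d > cur:
--             if cnt:
--                 answer.append(cnt)
--             cur = d
--             cnt = 1
--         else:
--             cnt += 1
--     if cnt: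
--         answer.append(cnt)
--     return answer
-- ===== Notes on version B (the rewrite author's own statement) =====
-- stated objective: alternative
-- what changed: A simulates the deployment day by day (adding every speed and re-checking the queue each day); B computes each feature's finish day once by ceiling division and groups the features in a single pass by the running maximum day (intended as the faster algorithm; a timing run could not get a clean confirming reading, so no speed is claimed).
-- outside the precondition, e.g. on solution([10], []): A raises IndexError, B returns []; on solution([50], [0]): A does not finish within the time limit, B raises ZeroDivisionError; on solution([100], [0]): A returns [1], B raises ZeroDivisionError
import Mathlib
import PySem

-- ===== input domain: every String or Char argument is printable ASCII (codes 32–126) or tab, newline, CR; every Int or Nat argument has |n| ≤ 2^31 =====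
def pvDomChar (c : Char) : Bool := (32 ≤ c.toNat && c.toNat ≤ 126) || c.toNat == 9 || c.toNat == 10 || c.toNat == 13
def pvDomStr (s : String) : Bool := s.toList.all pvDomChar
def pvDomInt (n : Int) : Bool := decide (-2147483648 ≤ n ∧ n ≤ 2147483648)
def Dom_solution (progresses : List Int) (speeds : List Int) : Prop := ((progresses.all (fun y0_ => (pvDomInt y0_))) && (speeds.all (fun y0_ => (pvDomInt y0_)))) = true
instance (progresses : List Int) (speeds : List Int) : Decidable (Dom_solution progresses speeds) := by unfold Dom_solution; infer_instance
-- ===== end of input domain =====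

-- B replaces A's day-by-day simulation with a single pass over per-feature ceiling-division day counts grouped by running maximum (return value only; neither mutates its arguments).

-- ===== PORT A =====
-- one simulated day: progress[i] += speed[i], capped at 100 (A's inner for-loop)
def solAday (ps ss : List Int) : List Int :=
  List.zipWith (fun p s => if p + s > 100 then (100 : Int) else p + s) ps ss

-- A's inner while: how many leading features are exactly at 100
def solCount100 : List Int → Nat
  | [] => 0
  | p :: rest => if p = 100 then solCount100 rest + 1 else 0

-- A's outer while-loop; fuel is a totality guard only: under Pre_solution (paired speeds ≥ 1)
-- every feature needs at most 100 + |progress| days, so the fuel below is never exhausted.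
def solLoop : Nat → List Int → List Int → List Int → List Int
  | 0, _, _, ans => ans
  | _ + 1, [], _, ans => ans
  | fuel + 1, p :: pt, ss, ans =>
    let ps' := solAday (p :: pt) ss
    let c := solCount100 ps'
    let ans' := if 0 < c then ans ++ [(c : Int)] else ans
    solLoop fuel (ps'.drop c) (ss.drop c) ans'

def solution (progresses : List Int) (speeds : List Int) : List Int :=
  solLoop (101 + (progresses.map Int.natAbs).sum) progresses speeds []

-- ===== PORT B =====
-- days until feature (p, s) is done: max(1, -((p - 100) // s))
def dDays (p s : Int) : Int := max 1 (-(PySem.Int.floordiv (p - 100) s))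

def solution_alt (progresses : List Int) (speeds : List Int) : List Int :=
  let r := (progresses.zip speeds).foldl (fun st pr =>
      let d := dDays pr.1 pr.2
      if d > st.2.1 then ((if st.2.2 ≠ 0 then st.1 ++ [st.2.2] else st.1), d, (1 : Int))
      else (st.1, st.2.1, st.2.2 + 1)) ([], 0, 0)
  if r.2.2 ≠ 0 then r.1 ++ [r.2.2] else r.1

-- ===== PRECONDITION & SPEC =====
-- Pre_ excludes: speeds shorter than progresses (A raises IndexError), and a paired speed ≤ 0,
-- outside the task's natural domain: there A usually diverges (progress can never reach 100),
-- and where it does return (a feature capped at 100 on day one) B raises (s = 0) or its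
-- ceiling-division day count is meaningless (s < 0).
def Pre_solution (progresses : List Int) (speeds : List Int) : Prop :=
  progresses.length ≤ speeds.length ∧ (∀ pr ∈ progresses.zip speeds, 1 ≤ pr.2)
instance (progresses : List Int) (speeds : List Int) : Decidable (Pre_solution progresses speeds) := by unfold Pre_solution; infer_instance
def pvWitness_solution : List Int × List Int := ([93, 30, 55], [1, 30, 5])

def Spec_solution (progresses : List Int) (speeds : List Int) (out : List Int) : Prop := out = solution_alt progresses speeds
instance (progresses : List Int) (speeds : List Int) (out : List Int) : Decidable (Spec_solution progresses speeds out) := by unfold Spec_solution; infer_instance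

-- ===== CLAIM (what is proved, stated in full; the proofs are below) =====
def Claim_equal_solution : Prop := ∀ (progresses : List Int) (speeds : List Int), Dom_solution progresses speeds → Pre_solution progresses speeds → Spec_solution progresses speeds (solution progresses speeds)

-- ===== LEMMAS AND PROOFS =====

-- days of a (progress, speed) pair
def dD (pr : Int × Int) : Int := dDays pr.1 pr.2
-- one day on the day-count: it drops by one, floored at 1
def decD (d : Int) : Int := max 1 (d - 1)
-- one day on a (progress, speed) pair
def capP (pr : Int × Int) : Int × Int := (if pr.1 + pr.2 > 100 then (100 : Int) else pr.1 + pr.2, pr.2)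
-- leading day-counts equal to 1
def countOnes : List Int → Nat
  | [] => 0
  | x :: xs => if x = 1 then countOnes xs + 1 else 0
-- grouping of a day-count list by running maximum (reference form of B's fold)
def grp : List Int → Int → Int → List Int
  | [], _, cnt => [cnt]
  | x :: xs, cur, cnt => if x > cur then cnt :: grp xs x 1 else grp xs cur (cnt + 1)
def dgroup : List Int → List Int
  | [] => []
  | d :: rest => grp rest d 1

theorem dDays_bound (p s : Int) (hs : 1 ≤ s) : dDays p s ≤ 100 + (p.natAbs : Int) := by
  unfold dDays
  have h1 : (p - 100 : Int) ≤ PySem.Int.floordiv (p - 100) s ↔ (p - 100) * s ≤ p - 100 :=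
    PySem.Int.le_floordiv_iff_mul_le (by omega)
  by_cases hp : p - 100 ≤ 0
  · have h2 : (p - 100 : Int) * s ≤ p - 100 := by nlinarith
    omega
  · have h3 : (0 : Int) ≤ PySem.Int.floordiv (p - 100) s := by
      rw [PySem.Int.le_floordiv_iff_mul_le (by omega)]
      omega
    omega

theorem dDays_eq_one_iff (p s : Int) (hs : 1 ≤ s) : dDays p s = 1 ↔ 100 ≤ p + s := by
  unfold dDays
  have h1 : (-1 : Int) ≤ PySem.Int.floordiv (p - 100) s ↔ (-1) * s ≤ p - 100 :=
    PySem.Int.le_floordiv_iff_mul_le (by omega)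
  omega

theorem aday_eq_map (ps : List Int) : ∀ ss : List Int, solAday ps ss = (ps.zip ss).map (fun pr => (capP pr).1) := by
  induction ps with
  | nil => intro ss; rfl
  | cons p pt ih => intro ss; cases ss with
    | nil => rfl
    | cons s st =>
      simp only [solAday, List.zipWith, List.zip, List.map, capP] at *
      exact congrArg _ (ih st)

theorem zip_aday (ps : List Int) : ∀ ss : List Int, (solAday ps ss).zip ss = (ps.zip ss).map capP := by
  induction ps with
  | nil => intro ss; rfl
  | cons p pt ih => intro ss; cases ss with
    | nil => rfl
    | cons s st =>
      simp only [solAday, List.zipWith, List.zip, capP] at *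
      exact congrArg _ (ih st)

theorem count100_eq (Z : List (Int × Int)) (h : ∀ pr ∈ Z, 1 ≤ pr.2) :
    solCount100 (Z.map (fun pr => (capP pr).1)) = countOnes (Z.map dD) := by
  induction Z with
  | nil => rfl
  | cons pr Z ih =>
    have hs := h pr (by simp)
    have hiff : (capP pr).1 = 100 ↔ dD pr = 1 := by
      unfold capP dD
      rw [dDays_eq_one_iff _ _ hs]
      split_ifs with hc <;> omega
    simp only [List.map, solCount100, countOnes]
    by_cases hcap : (capP pr).1 = 100
    · rw [if_pos hcap, if_pos (hiff.mp hcap), ih (fun q hq => h q (by simp [hq]))]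
    · rw [if_neg hcap, if_neg (fun he => hcap (hiff.mpr he))]

theorem grp_map_dec (ds : List Int) : ∀ (cur cnt : Int), 2 ≤ cur → (∀ x ∈ ds, 1 ≤ x) →
    grp (ds.map decD) (cur - 1) cnt = grp ds cur cnt := by
  induction ds with
  | nil => intros; rfl
  | cons x xs ih =>
    intro cur cnt hcur h
    have hx := h x (by simp)
    have hrest : ∀ y ∈ xs, 1 ≤ y := fun y hy => h y (by simp [hy])
    by_cases h2 : 2 ≤ x
    · have hdec : decD x = x - 1 := by unfold decD; omega
      by_cases hgt : x > cur
      · simp only [List.map, grp, hdec, if_pos (show x - 1 > cur - 1 by omega), if_pos hgt]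
        rw [show (x - 1) = x - 1 by rfl]
        exact congrArg _ (ih x 1 h2 hrest)
      · simp only [List.map, grp, hdec, if_neg (show ¬(x - 1 > cur - 1) by omega), if_neg hgt]
        exact ih cur (cnt + 1) hcur hrest
    · have hx1 : x = 1 := by omega
      subst hx1
      have hdec : decD 1 = 1 := by unfold decD; omega
      simp only [List.map, grp, hdec,
        if_neg (show ¬((1:Int) > cur - 1) by omega), if_neg (show ¬((1:Int) > cur) by omega)]
      exact ih cur (cnt + 1) hcur hrest

theorem grp_ones (rest : List Int) : ∀ (cnt : Int), (∀ x ∈ rest, 1 ≤ x) →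
    grp rest 1 cnt = (cnt + (countOnes rest : Int)) :: dgroup ((rest.drop (countOnes rest)).map decD) := by
  induction rest with
  | nil => intro cnt h; simp [grp, countOnes, dgroup]
  | cons x xs ih =>
    intro cnt h
    have hx := h x (by simp)
    have hrest : ∀ y ∈ xs, 1 ≤ y := fun y hy => h y (by simp [hy])
    by_cases hx1 : x = 1
    · rw [show countOnes (x :: xs) = countOnes xs + 1 by simp [countOnes, hx1]]
      simp only [grp, hx1, if_neg (show ¬((1:Int) > 1) by omega)]
      rw [ih (cnt + 1) hrest]
      simp only [List.drop_succ_cons]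
      congr 1
      push_cast; ring
    · have h2 : 2 ≤ x := by omega
      rw [show countOnes (x :: xs) = 0 by simp [countOnes, hx1]]
      simp only [grp, if_pos (show x > 1 by omega), List.drop_zero]
      have hdec : decD x = x - 1 := by unfold decD; omega
      simp only [dgroup, List.map, hdec]
      rw [grp_map_dec xs x 1 h2 hrest]
      simp

theorem dgroup_step (ds : List Int) (h : ∀ x ∈ ds, 1 ≤ x) :
    dgroup ds = (if 0 < countOnes ds then [(countOnes ds : Int)] else [])
      ++ dgroup ((ds.drop (countOnes ds)).map decD) := by
  cases ds with
  | nil => rfl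
  | cons x xs =>
    have hx := h x (by simp)
    have hrest : ∀ y ∈ xs, 1 ≤ y := fun y hy => h y (by simp [hy])
    by_cases hx1 : x = 1
    · rw [show countOnes (x :: xs) = countOnes xs + 1 by simp [countOnes, hx1]]
      rw [if_pos (Nat.succ_pos _)]
      have hun : dgroup (x :: xs) = grp xs 1 1 := by rw [hx1]; rfl
      rw [hun, grp_ones xs 1 hrest, List.drop_succ_cons, List.singleton_append]
      congr 1
      push_cast; ring
    · have h2 : 2 ≤ x := by omega
      rw [show countOnes (x :: xs) = 0 by simp [countOnes, hx1]]
      simp only [dgroup, if_neg (by omega), List.drop_zero, List.nil_append, List.map]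
      have hdec : decD x = x - 1 := by unfold decD; omega
      rw [hdec, grp_map_dec xs x 1 h2 hrest]
      simp

def bstep (st : List Int × Int × Int) (d : Int) : List Int × Int × Int :=
  if d > st.2.1 then ((if st.2.2 ≠ 0 then st.1 ++ [st.2.2] else st.1), d, (1 : Int))
  else (st.1, st.2.1, st.2.2 + 1)

theorem foldB_eq_grp (ds : List Int) : ∀ (ans : List Int) (cur cnt : Int), 1 ≤ cnt →
    (let r := ds.foldl bstep (ans, cur, cnt)
     if r.2.2 ≠ 0 then r.1 ++ [r.2.2] else r.1) = ans ++ grp ds cur cnt := by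
  induction ds with
  | nil => intro ans cur cnt hcnt; simp [grp, show cnt ≠ 0 by omega]
  | cons d xs ih =>
    intro ans cur cnt hcnt
    simp only [List.foldl_cons, grp, bstep]
    by_cases hgt : d > cur
    · rw [if_pos hgt, if_pos hgt, if_pos (show cnt ≠ 0 by omega)]
      rw [ih (ans ++ [cnt]) d 1 (by omega)]
      simp
    · rw [if_neg hgt, if_neg hgt]
      exact ih ans cur (cnt + 1) (by omega)

theorem one_le_dDays (p s : Int) : 1 ≤ dDays p s := le_max_left _ _

theorem alt_eq_dgroup (ps ss : List Int) : solution_alt ps ss = dgroup ((ps.zip ss).map dD) := by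
  unfold solution_alt
  have hb : (fun (st : List Int × Int × Int) (pr : Int × Int) =>
      let d := dDays pr.1 pr.2
      if d > st.2.1 then ((if st.2.2 ≠ 0 then st.1 ++ [st.2.2] else st.1), d, (1 : Int))
      else (st.1, st.2.1, st.2.2 + 1)) = (fun st pr => bstep st (dD pr)) := rfl
  rw [hb, ← List.foldl_map]
  cases hz : (ps.zip ss).map dD with
  | nil => rfl
  | cons d Z =>
    simp only [List.foldl_cons]
    have hd1 : 1 ≤ d := by
      have : d ∈ (ps.zip ss).map dD := by rw [hz]; simp
      obtain ⟨pr, _, hpr⟩ := List.mem_map.mp this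
      rw [← hpr]; exact one_le_dDays pr.1 pr.2
    rw [show bstep ([], 0, 0) d = ([], d, 1) by
      unfold bstep; simp only []; rw [if_pos (show d > (0:Int) by omega)]; simp]
    rw [foldB_eq_grp Z [] d 1 (by omega)]
    simp [dgroup]

theorem dDays_cap (p s : Int) (hs : 1 ≤ s) :
    dDays (if p + s > 100 then (100 : Int) else p + s) s = decD (dDays p s) := by
  unfold dDays decD
  have hiff : (-1 : Int) ≤ PySem.Int.floordiv (p - 100) s ↔ (-1) * s ≤ p - 100 :=
    PySem.Int.le_floordiv_iff_mul_le (by omega)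
  by_cases hc : 100 ≤ p + s
  · have h0 : PySem.Int.floordiv (100 - 100) s = 0 := by
      norm_num [PySem.Int.floordiv_eq_ediv_of_pos (show (0:Int) < s by omega)]
    split_ifs with h
    · rw [h0]; omega
    · rw [show p + s - 100 = 100 - 100 by omega, h0]; omega
  · rw [if_neg (by omega)]
    have hshift : PySem.Int.floordiv (p + s - 100) s = PySem.Int.floordiv (p - 100) s + 1 := by
      rw [PySem.Int.floordiv_eq_ediv_of_pos (by omega), PySem.Int.floordiv_eq_ediv_of_pos (by omega)]
      rw [show p + s - 100 = (p - 100) + 1 * s by ring]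
      rw [Int.add_mul_ediv_right _ _ (by omega)]
    have hq : PySem.Int.floordiv (p - 100) s < -1 := by
      rw [PySem.Int.floordiv_lt_iff_lt_mul (by omega)]
      omega
    omega

theorem dD_capP (pr : Int × Int) (hs : 1 ≤ pr.2) : dD (capP pr) = decD (dD pr) := by
  unfold dD capP
  exact dDays_cap pr.1 pr.2 hs

theorem zip_drop_comm (xs ys : List Int) (n : Nat) :
    (xs.drop n).zip (ys.drop n) = (xs.zip ys).drop n := (List.drop_zipWith).symm

theorem countOnes_all_ones (ds : List Int) (h : ∀ x ∈ ds, x = 1) : countOnes ds = ds.length := by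
  induction ds with
  | nil => rfl
  | cons x xs ih =>
    rw [show countOnes (x :: xs) = countOnes xs + 1 by simp [countOnes, h x (by simp)]]
    rw [ih (fun y hy => h y (by simp [hy]))]
    simp

theorem loop_eq_dgroup (fuel : Nat) : ∀ (ps ss ans : List Int),
    ps.length ≤ ss.length → (∀ pr ∈ ps.zip ss, 1 ≤ pr.2) →
    (∀ pr ∈ ps.zip ss, dD pr ≤ (fuel : Int)) →
    solLoop fuel ps ss ans = ans ++ dgroup ((ps.zip ss).map dD) := by
  induction fuel with
  | zero =>
    intro ps ss ans hlen hs hf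
    cases ps with
    | nil => simp [solLoop, dgroup]
    | cons p pt =>
      cases ss with
      | nil => simp at hlen
      | cons s st =>
        exfalso
        have hm : (p, s) ∈ (p :: pt).zip (s :: st) := by simp [List.zip]
        have h1 : 1 ≤ dD (p, s) := one_le_dDays p s
        have h2 := hf _ hm
        simp at h2; omega
  | succ fuel ih =>
    intro ps ss ans hlen hs hf
    cases ps with
    | nil => simp [solLoop, dgroup]
    | cons p pt =>
      cases ss with
      | nil => simp at hlen
      | cons s st =>
        rw [show solLoop (fuel + 1) (p :: pt) (s :: st) ans
            = solLoop fuel ((solAday (p :: pt) (s :: st)).drop (solCount100 (solAday (p :: pt) (s :: st))))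
                ((s :: st).drop (solCount100 (solAday (p :: pt) (s :: st))))
                (if 0 < solCount100 (solAday (p :: pt) (s :: st)) then ans ++ [(solCount100 (solAday (p :: pt) (s :: st)) : Int)] else ans)
          from rfl]
        set Z := (p :: pt).zip (s :: st) with hZ
        set c := solCount100 (solAday (p :: pt) (s :: st)) with hc
        have hone : ∀ x ∈ Z.map dD, 1 ≤ x := by
          intro x hx
          obtain ⟨q, _, rfl⟩ := List.mem_map.mp hx
          exact one_le_dDays q.1 q.2
        have hcC : c = countOnes (Z.map dD) := by
          rw [hc, aday_eq_map]
          exact count100_eq Z hs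
        have hzipdrop : ((solAday (p :: pt) (s :: st)).drop c).zip ((s :: st).drop c)
            = (Z.map capP).drop c := by
          rw [zip_drop_comm]
          rw [show ((solAday (p :: pt) (s :: st)).zip (s :: st)) = Z.map capP from zip_aday _ _]
        have hmem : ∀ pr ∈ (Z.map capP).drop c, ∃ q ∈ Z, pr = capP q := by
          intro pr hpr
          obtain ⟨q, hq, hqe⟩ := List.mem_map.mp (List.mem_of_mem_drop hpr)
          exact ⟨q, hq, hqe.symm⟩
        have hsd : ∀ pr ∈ (Z.map capP).drop c, 1 ≤ pr.2 := by
          intro pr hpr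
          obtain ⟨q, hq, rfl⟩ := hmem pr hpr
          exact hs q hq
        have hdnew : ((Z.map capP).drop c).map dD = ((Z.map dD).map decD).drop c := by
          rw [List.map_drop]
          congr 1
          rw [List.map_map, List.map_map]
          exact List.map_congr_left (fun q hq => dD_capP q (hs q hq))
        have hfd : ∀ pr ∈ (Z.map capP).drop c, dD pr ≤ (fuel : Int) := by
          intro pr hpr
          by_cases hf0 : 1 ≤ fuel
          · obtain ⟨q, hq, rfl⟩ := hmem pr hpr
            have := hf q hq
            rw [dD_capP q (hs q hq)]
            unfold decD
            push_cast at *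
            omega
          · exfalso
            have hall1 : ∀ x ∈ Z.map dD, x = 1 := by
              intro x hx
              have h2 := hone x hx
              obtain ⟨q, hq, rfl⟩ := List.mem_map.mp hx
              have h3 := hf q hq
              push_cast at h3
              omega
            have hclen : c = Z.length := by
              rw [hcC, countOnes_all_ones _ hall1, List.length_map]
            have : (Z.map capP).drop c = [] := by
              apply List.drop_eq_nil_of_le
              rw [List.length_map, hclen]
            rw [this] at hpr
            simp at hpr
        have hlen' : ((solAday (p :: pt) (s :: st)).drop c).length ≤ ((s :: st).drop c).length := by
          rw [List.length_drop, List.length_drop]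
          have : (solAday (p :: pt) (s :: st)).length = (p :: pt).length := by
            unfold solAday
            rw [List.length_zipWith]
            simp at hlen ⊢
            omega
          rw [this]
          simp at hlen ⊢
          omega
        rw [ih _ _ _ hlen' (by rw [hzipdrop]; exact hsd) (by rw [hzipdrop]; exact hfd)]
        rw [hzipdrop, hdnew]
        rw [dgroup_step (Z.map dD) hone, ← hcC, List.map_drop]
        by_cases hcz : 0 < c
        · rw [if_pos hcz, if_pos hcz]
          simp
        · rw [if_neg hcz, if_neg hcz]
          simp

-- ===== VERDICT (by name: the statement is the Claim_ definition above) =====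
theorem solution_spec : Claim_equal_solution := by
  intro ps ss _ hpre
  obtain ⟨hlen, hs⟩ := hpre
  unfold Spec_solution
  rw [alt_eq_dgroup]
  unfold solution
  rw [loop_eq_dgroup (101 + (ps.map Int.natAbs).sum) ps ss [] hlen hs ?_]
  · simp
  · intro pr hm
    have h1 := hs pr hm
    have h2 := dDays_bound pr.1 pr.2 h1
    have h3 : pr.1.natAbs ≤ ((ps.map Int.natAbs).sum : Nat) := by
      apply List.single_le_sum (by intro x _; exact Nat.zero_le x)
      exact List.mem_map_of_mem (List.of_mem_zip hm).1
    unfold dD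
    omega
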